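-- pv_equiv track=rewrite | github.com/onetrueheisenberg/cps-ci-cd-analysis | parser.py | parse_dockerfile
-- ===== SOURCE A (Python) =====
-- from typing import List, Dict
--
-- def parse_dockerfile(contents: str) -> List[Dict[str, str]]:
--     instructions: List[Dict[str, str]] = []
--     current = ""
--     for line in contents.splitlines():
--         stripped = line.strip()
--         if not stripped:
--             continue
--         if stripped.startswith("#"):
--             if stripped.lower().startswith("# syntax="):
--                 instructions.append({"instruction": "SYNTAX", "value": stripped})
--             continue
--         def remove_inline_comment(s: str) -> str:
--             in_quote = False
--             result = []
--             for char in s: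
--                 if char in ('"', "'"):
--                     in_quote = not in_quote
--                 if char == '#' and not in_quote:
--                     break
--                 result.append(char)
--             return ''.join(result).rstrip()
--
--         stripped = remove_inline_comment(stripped)
--         if not stripped:
--             continue
--         if stripped.endswith("\\"):
--             current += stripped[:-1].rstrip() + " "
--             continue
--         current += stripped
--         parts = current.split(None, 1)
--         if not parts:
--             current = ""
--             continue
--         instr = parts[0].upper()
--         value = parts[1] if len(parts) > 1 else ""
--         instructions.append({"instruction": instr, "value": value})
--         current = ""
--     return instructions
-- ===== SOURCE B (Python) =====
-- def _drop_inline_comment(s):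
--     in_quote = False
--     for i, ch in enumerate(s):
--         if ch in "\"'":
--             in_quote = not in_quote
--         elif ch == '#' and not in_quote:
--             return s[:i].rstrip()
--     return s.rstrip()
--
--
-- def _logical_stream(contents):
--     # first pass: turn physical lines into an interleaved stream of
--     # ("syntax", text) records and completed ("line", text) logical lines
--     events = []
--     pending = ""
--     for raw in contents.splitlines():
--         line = raw.strip()
--         if not line:
--             continue
--         if line.startswith("#"):
--             if line.lower().startswith("# syntax="):
--                 events.append(("syntax", line))
--         else:
--             line = _drop_inline_comment(line)
--             if not line:
--                 continue
--             if line.endswith("\\"):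
--                 pending += line[:-1].rstrip() + " "
--             else:
--                 events.append(("line", pending + line))
--                 pending = ""
--     return events
--
--
-- def parse_dockerfile(contents):
--     # second pass: render each event of the stream as an instruction dict
--     out = []
--     for kind, text in _logical_stream(contents):
--         if kind == "syntax":
--             out.append({"instruction": "SYNTAX", "value": text})
--         else:
--             parts = text.split(None, 1)
--             if not parts:
--                 continue
--             out.append({"instruction": parts[0].upper(),
--                         "value": parts[1] if len(parts) > 1 else ""})
--     return out
-- ===== Notes on version B (the rewrite author's own statement) =====
-- stated objective: alternative
-- what changed: B replaces A's single stateful loop that builds instruction dicts inline with a two-pass decomposition: a first pass emitting an interleaved stream of SYNTAX records and completed backslash-joined logical lines, and a second rendering pass that splits/upcases each logical line into a dict; the inline-comment stripper is also rewritten as an index scan returning s[:i] instead of accumulating characters.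
import Mathlib
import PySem

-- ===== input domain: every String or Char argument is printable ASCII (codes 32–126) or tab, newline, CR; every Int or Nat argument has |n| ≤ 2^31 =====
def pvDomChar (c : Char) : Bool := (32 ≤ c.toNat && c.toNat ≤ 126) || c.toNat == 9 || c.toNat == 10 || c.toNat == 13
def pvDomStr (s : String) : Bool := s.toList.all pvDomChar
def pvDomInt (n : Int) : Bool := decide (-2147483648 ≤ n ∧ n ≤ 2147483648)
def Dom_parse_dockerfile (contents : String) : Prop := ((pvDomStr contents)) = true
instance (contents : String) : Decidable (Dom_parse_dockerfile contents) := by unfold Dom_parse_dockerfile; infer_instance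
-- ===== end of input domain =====

-- B replaces A's single loop (which builds instruction dicts inline) by a two-pass
-- decomposition: a first pass that emits an interleaved stream of SYNTAX records and
-- completed logical lines, and a second pass that renders each stream event as a dict;
-- objective: alternative decomposition, same cost.

-- ===== PORT A =====
-- A's remove_inline_comment: accumulate chars, toggle in_quote, break at unquoted '#'
def pvRiGoA : List Char → Bool → List Char → List Char
  | [], _, acc => acc.reverse
  | c :: cs, q, acc =>
    let q' := if c = '"' ∨ c = '\'' then !q else q
    if c = '#' ∧ q' = false then acc.reverse else pvRiGoA cs q' (c :: acc)

def pvRemoveInlineA (s : List Char) : List Char :=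
  PySem.Chars.rstrip (pvRiGoA s false [])

-- one iteration of A's for-loop; state = (instructions, current)
def pvStepA (st : List (List (String × String)) × List Char) (line : List Char) :
    List (List (String × String)) × List Char :=
  let stripped := PySem.Chars.strip line
  if stripped = [] then st
  else if PySem.Chars.startswith stripped "#".toList then
    (if PySem.Chars.startswith (PySem.Chars.lower stripped) "# syntax=".toList then
       st.1 ++ [[("instruction", "SYNTAX"), ("value", String.ofList stripped)]]
     else st.1, st.2)
  else
    let stripped2 := pvRemoveInlineA stripped
    if stripped2 = [] then st
    else if PySem.Chars.endswith stripped2 "\\".toList then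
      -- stripped[:-1] = List.dropLast (exact: Python s[:-1] drops the last char, '' stays '')
      (st.1, st.2 ++ PySem.Chars.rstrip stripped2.dropLast ++ [' '])
    else
      match PySem.Chars.split₀Max (st.2 ++ stripped2) 1 with
      | [] => (st.1, [])
      | [p] => (st.1 ++ [[("instruction", String.ofList (PySem.Chars.upper p)), ("value", "")]], [])
      | p :: v :: _ =>
          (st.1 ++ [[("instruction", String.ofList (PySem.Chars.upper p)), ("value", String.ofList v)]], [])

def parse_dockerfile (contents : String) : List (List (String × String)) :=
  (List.foldl pvStepA ([], []) (PySem.Chars.splitlines contents.toList)).1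

-- ===== PORT B =====
-- B's _drop_inline_comment: scan by index, cut at the first unquoted '#' with s[:i]
def pvDropGoB (s : List Char) : List Char → Nat → Bool → List Char
  | [], _, _ => PySem.Chars.rstrip s
  | c :: cs, i, q =>
    if c = '"' ∨ c = '\'' then pvDropGoB s cs (i + 1) (!q)
    else if c = '#' ∧ q = false then PySem.Chars.rstrip (s.take i)
    else pvDropGoB s cs (i + 1) q

def pvDropInlineB (s : List Char) : List Char := pvDropGoB s s 0 false

-- B's first pass: one event per emitted record, (true, text) = SYNTAX, (false, text) = logical line
def pvStepB (st : List (Bool × List Char) × List Char) (raw : List Char) :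
    List (Bool × List Char) × List Char :=
  let line := PySem.Chars.strip raw
  if line = [] then st
  else if PySem.Chars.startswith line "#".toList then
    (if PySem.Chars.startswith (PySem.Chars.lower line) "# syntax=".toList then
       st.1 ++ [(true, line)]
     else st.1, st.2)
  else
    let line2 := pvDropInlineB line
    if line2 = [] then st
    else if PySem.Chars.endswith line2 "\\".toList then
      (st.1, st.2 ++ PySem.Chars.rstrip line2.dropLast ++ [' '])
    else (st.1 ++ [(false, st.2 ++ line2)], [])

-- B's second pass: render one event ('continue' on an empty split = none, dropped)
def pvEmitB (e : Bool × List Char) : Option (List (String × String)) :=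
  if e.1 then some [("instruction", "SYNTAX"), ("value", String.ofList e.2)]
  else
    match PySem.Chars.split₀Max e.2 1 with
    | [] => none
    | [p] => some [("instruction", String.ofList (PySem.Chars.upper p)), ("value", "")]
    | p :: v :: _ =>
        some [("instruction", String.ofList (PySem.Chars.upper p)), ("value", String.ofList v)]

def parse_dockerfile_alt (contents : String) : List (List (String × String)) :=
  ((List.foldl pvStepB ([], []) (PySem.Chars.splitlines contents.toList)).1).filterMap pvEmitB

-- ===== PRECONDITION & SPEC =====
def Spec_parse_dockerfile (contents : String) (out : List (List (String × String))) : Prop := out = parse_dockerfile_alt contents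
instance (contents : String) (out : List (List (String × String))) : Decidable (Spec_parse_dockerfile contents out) := by unfold Spec_parse_dockerfile; infer_instance

-- ===== CLAIM (what is proved, stated in full; the proofs are below) =====
def Claim_equal_parse_dockerfile : Prop := ∀ (contents : String), Dom_parse_dockerfile contents → Spec_parse_dockerfile contents (parse_dockerfile contents)

-- ===== LEMMAS AND PROOFS =====

-- A's comment scanner with a non-empty accumulator = the accumulator plus the scan from empty
theorem pvRiGoA_acc (cs : List Char) : ∀ (q : Bool) (acc : List Char),
    pvRiGoA cs q acc = acc.reverse ++ pvRiGoA cs q [] := by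
  induction cs with
  | nil => intro q acc; simp [pvRiGoA]
  | cons c cs ih =>
    intro q acc
    simp only [pvRiGoA]
    split_ifs <;> first
      | simp
      | (rw [ih _ (c :: acc), ih _ [c]]; simp)

-- B's index scan over the suffix cs (with i = the length of the consumed prefix)
-- computes A's accumulate-and-rstrip scan
theorem pvDropGoB_eq (s : List Char) : ∀ (cs pre : List Char) (q : Bool),
    pre ++ cs = s →
    pvDropGoB s cs pre.length q = PySem.Chars.rstrip (pre ++ pvRiGoA cs q []) := by
  intro cs
  induction cs with
  | nil =>
    intro pre q h
    simp only [List.append_nil] at h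
    simp [pvDropGoB, pvRiGoA, h]
  | cons c cs ih =>
    intro pre q h
    have h' : (pre ++ [c]) ++ cs = s := by simpa [List.append_assoc] using h
    have hlen : (pre ++ [c]).length = pre.length + 1 := by simp
    have htake : s.take pre.length = pre := by rw [← h]; simp
    simp only [pvDropGoB, pvRiGoA]
    by_cases hq : c = '"' ∨ c = '\''
    · have hne : ¬ (c = '#' ∧ (!q) = false) := by
        rcases hq with h1 | h1 <;> simp [h1]
      simp only [if_pos hq, if_neg hne]
      rw [← hlen, ih (pre ++ [c]) (!q) h', pvRiGoA_acc cs (!q) [c]]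
      simp
    · simp only [if_neg hq]
      by_cases hh : c = '#' ∧ q = false
      · simp only [if_pos hh, htake]
        simp
      · simp only [if_neg hh]
        rw [← hlen, ih (pre ++ [c]) q h', pvRiGoA_acc cs q [c]]
        simp

theorem dropInline_eq (s : List Char) : pvDropInlineB s = pvRemoveInlineA s := by
  unfold pvDropInlineB pvRemoveInlineA
  have := pvDropGoB_eq s s [] false (by simp)
  simpa using this

-- B's first pass only ever appends events: a seeded event list passes through unchanged
theorem pvStepB_shape (es : List (Bool × List Char)) (cur raw : List Char) :
    pvStepB (es, cur) raw = (es ++ (pvStepB ([], cur) raw).1, (pvStepB ([], cur) raw).2) := by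
  simp only [pvStepB]
  split_ifs <;> simp

theorem stepB_foldl_prefix (lines : List (List Char)) :
    ∀ (es : List (Bool × List Char)) (cur : List Char),
    List.foldl pvStepB (es, cur) lines =
      (es ++ (List.foldl pvStepB ([], cur) lines).1, (List.foldl pvStepB ([], cur) lines).2) := by
  induction lines with
  | nil => intro es cur; simp
  | cons l lines ih =>
    intro es cur
    simp only [List.foldl_cons, pvStepB_shape es cur l]
    rw [ih ((pvStepB ([], cur) l).1) ((pvStepB ([], cur) l).2),
        ih (es ++ (pvStepB ([], cur) l).1) ((pvStepB ([], cur) l).2)]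
    simp

-- one iteration: A's step = B's step with its fresh events rendered by pvEmitB
theorem step_corr (acc : List (List (String × String))) (cur raw : List Char) :
    pvStepA (acc, cur) raw =
      (acc ++ ((pvStepB ([], cur) raw).1).filterMap pvEmitB, (pvStepB ([], cur) raw).2) := by
  simp only [pvStepA, pvStepB, dropInline_eq]
  split_ifs with h1 h2 h3 h4 h5
  · simp
  · simp [pvEmitB]
  · simp
  · simp
  · simp
  · rcases hsp : PySem.Chars.split₀Max (cur ++ pvRemoveInlineA (PySem.Chars.strip raw)) 1 with
      _ | ⟨p, _ | ⟨v, rest⟩⟩ <;> simp [pvEmitB, hsp]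

-- main invariant: A's loop from (acc, cur) = acc plus the rendered event stream of B from cur
theorem main_inv (lines : List (List Char)) :
    ∀ (acc : List (List (String × String))) (cur : List Char),
    List.foldl pvStepA (acc, cur) lines =
      (acc ++ ((List.foldl pvStepB ([], cur) lines).1).filterMap pvEmitB,
       (List.foldl pvStepB ([], cur) lines).2) := by
  induction lines with
  | nil => intro acc cur; simp
  | cons l lines ih =>
    intro acc cur
    rcases hs : pvStepB ([], cur) l with ⟨ev, cur'⟩
    simp only [List.foldl_cons, step_corr, hs, stepB_foldl_prefix lines ev cur', ih]
    simp [List.filterMap_append, List.append_assoc]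

-- ===== VERDICT (by name: the statement is the Claim_ definition above) =====
theorem parse_dockerfile_spec : Claim_equal_parse_dockerfile := by
  intro contents _
  unfold Spec_parse_dockerfile parse_dockerfile parse_dockerfile_alt
  rw [main_inv (PySem.Chars.splitlines contents.toList) [] []]
  simp
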